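-- pv_equiv track=rewrite | github.com/nngeek195/Algothon | .history/main1_20241211010223.py | schedule_jobs
-- ===== SOURCE A (Python) =====
-- import heapq
--
-- def schedule_jobs(num_jobs, execution_times, top_order, num_machines):
--     # Min-heap to track next available time of each machine
--     machine_heap = [(0, i) for i in range(num_machines)]  # (time, machine_id)
--     heapq.heapify(machine_heap)
--
--     # Track job completion times
--     job_completion_time = [0] * num_jobs
--
--     for job in top_order:
--         earliest_time, machine_id = heapq.heappop(machine_heap)
--         start_time = earliest_time
--         finish_time = start_time + execution_times[job]
--         job_completion_time[job] = finish_time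
--
--         # Update machine availability
--         heapq.heappush(machine_heap, (finish_time, machine_id))
--
--     # Makespan is the maximum finish time of all jobs
--     makespan = max(job_completion_time)
--     return makespan, job_completion_time
-- ===== SOURCE B (Python) =====
-- def schedule_jobs(num_jobs, execution_times, top_order, num_machines):
--     # Plain list of machine available-times instead of a heap: pick the machine
--     # by a linear scan for the minimum (first minimal index = heap's tie-break).
--     machine_times = [0] * num_machines
--     job_completion_time = [0] * num_jobs
--
--     for job in top_order:
--         best = 0
--         for i in range(1, num_machines):
--             if machine_times[i] < machine_times[best]:
--                 best = i
--         finish = machine_times[best] + execution_times[job]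
--         job_completion_time[job] = finish
--         machine_times[best] = finish
--
--     makespan = max(job_completion_time)
--     return makespan, job_completion_time
-- ===== Notes on version B (the rewrite author's own statement) =====
-- stated objective: alternative
-- what changed: Replaces the heapq min-heap of (time, machine_id) pairs with a plain list of machine times and a linear argmin scan per job (first minimal index reproduces the heap's lexicographic tie-break).
import Mathlib
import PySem

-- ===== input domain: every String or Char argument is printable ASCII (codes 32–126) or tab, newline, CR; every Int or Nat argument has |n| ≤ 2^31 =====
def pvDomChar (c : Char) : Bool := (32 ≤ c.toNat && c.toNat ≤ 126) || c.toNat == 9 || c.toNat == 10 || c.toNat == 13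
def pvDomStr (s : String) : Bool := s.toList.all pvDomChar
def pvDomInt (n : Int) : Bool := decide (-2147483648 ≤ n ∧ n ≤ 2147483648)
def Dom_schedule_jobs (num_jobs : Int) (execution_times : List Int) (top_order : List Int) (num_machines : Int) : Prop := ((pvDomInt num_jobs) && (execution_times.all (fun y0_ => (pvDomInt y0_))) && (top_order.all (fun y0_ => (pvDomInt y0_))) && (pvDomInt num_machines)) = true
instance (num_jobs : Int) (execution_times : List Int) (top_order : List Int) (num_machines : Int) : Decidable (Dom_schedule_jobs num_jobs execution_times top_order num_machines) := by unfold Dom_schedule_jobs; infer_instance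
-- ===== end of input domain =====

-- B replaces A's heapq min-heap by a plain machine-times list with a linear argmin
-- scan per job (alternative data structure; same outputs, heap tie-break preserved).

-- ===== PORT A =====
-- Python's lexicographic '<' on (time, machine_id) pairs.
def lexLt (a b : Int × Int) : Bool := a.1 < b.1 || (a.1 == b.1 && a.2 < b.2)

-- heapq contract: heappop removes and returns the smallest element of the heap
-- (unique here, as machine ids are distinct). Ported as min-scan + erase.
def findMin : List (Int × Int) → Option (Int × Int)
  | [] => none
  | x :: xs => some (xs.foldl (fun m y => if lexLt y m then y else m) x)

-- the loop 'for job in top_order: …' of A; none = the Python raises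
def aLoop (execution_times : List Int) : List Int → List (Int × Int) → List Int →
    Option (List (Int × Int) × List Int)
  | [], heap, jct => some (heap, jct)
  | job :: rest, heap, jct =>
    match findMin heap with
    | none => none  -- heappop on empty heap: IndexError
    | some m =>
      match PySem.List.pyGet? execution_times job with
      | none => none
      | some e =>
        let finish := m.1 + e
        match PySem.List.pySet? jct job finish with
        | none => none
        | some jct' => aLoop execution_times rest ((finish, m.2) :: heap.erase m) jct'

def schedule_jobs (num_jobs : Int) (execution_times : List Int) (top_order : List Int) (num_machines : Int) : Int × List Int :=
  let machine_heap := (PySem.List.pyRange 0 num_machines 1).map (fun i => ((0 : Int), i))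
  let jct := List.replicate num_jobs.toNat 0  -- [0] * num_jobs (empty for num_jobs ≤ 0)
  match aLoop execution_times top_order machine_heap jct with
  | none => (0, [])  -- unreachable under Pre_
  | some (_, jct') =>
    match PySem.List.max? jct' (fun x => x) with
    | none => (0, [])  -- max([]) : ValueError, unreachable under Pre_
    | some mk => (mk, jct')

-- ===== PORT B =====
-- 'for i in range(1, num_machines): if machine_times[i] < machine_times[best]: best = i'
-- (every index drawn from range(1, num_machines) is in range, so getD is exact there)
def bestIdx (ts : List Int) : List Int → Int → Int
  | [], best => best
  | i :: rest, best =>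
    if ts.getD i.toNat 0 < ts.getD best.toNat 0 then bestIdx ts rest i
    else bestIdx ts rest best

def bLoop (execution_times : List Int) (num_machines : Int) :
    List Int → List Int → List Int → Option (List Int × List Int)
  | [], ts, jct => some (ts, jct)
  | job :: rest, ts, jct =>
    let best := bestIdx ts (PySem.List.pyRange 1 num_machines 1) 0
    match PySem.List.pyGet? ts best with
    | none => none  -- machine_times[best] on empty list: IndexError
    | some tb =>
      match PySem.List.pyGet? execution_times job with
      | none => none
      | some e =>
        let finish := tb + e
        match PySem.List.pySet? jct job finish with
        | none => none
        | some jct' =>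
          match PySem.List.pySet? ts best finish with
          | none => none
          | some ts' => bLoop execution_times num_machines rest ts' jct'

def schedule_jobs_alt (num_jobs : Int) (execution_times : List Int) (top_order : List Int) (num_machines : Int) : Int × List Int :=
  let ts := List.replicate num_machines.toNat 0
  let jct := List.replicate num_jobs.toNat 0
  match bLoop execution_times num_machines top_order ts jct with
  | none => (0, [])
  | some (_, jct') =>
    match PySem.List.max? jct' (fun x => x) with
    | none => (0, [])
    | some mk => (mk, jct')

-- ===== PRECONDITION & SPEC =====
-- Pre_ excludes exactly the inputs where A raises: num_jobs ≤ 0 (max of an empty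
-- list: ValueError), a nonempty top_order with no machines (heappop: IndexError),
-- and job indices out of range for execution_times or job_completion_time (IndexError).
def Pre_schedule_jobs (num_jobs : Int) (execution_times : List Int) (top_order : List Int) (num_machines : Int) : Prop :=
  1 ≤ num_jobs ∧ (top_order = [] ∨ 1 ≤ num_machines) ∧
  ∀ j ∈ top_order, (-num_jobs ≤ j ∧ j < num_jobs) ∧
    (-(execution_times.length : Int) ≤ j ∧ j < (execution_times.length : Int))
instance (num_jobs : Int) (execution_times : List Int) (top_order : List Int) (num_machines : Int) : Decidable (Pre_schedule_jobs num_jobs execution_times top_order num_machines) := by unfold Pre_schedule_jobs; infer_instance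

def pvWitness_schedule_jobs : Int × List Int × List Int × Int := (3, [2, 5, 1], [2, 0, 1, 0], 2)

def Spec_schedule_jobs (num_jobs : Int) (execution_times : List Int) (top_order : List Int) (num_machines : Int) (out : Int × List Int) : Prop := out = schedule_jobs_alt num_jobs execution_times top_order num_machines
instance (num_jobs : Int) (execution_times : List Int) (top_order : List Int) (num_machines : Int) (out : Int × List Int) : Decidable (Spec_schedule_jobs num_jobs execution_times top_order num_machines out) := by unfold Spec_schedule_jobs; infer_instance

-- ===== CLAIM (what is proved, stated in full; the proofs are below) =====
def Claim_equal_schedule_jobs : Prop := ∀ (num_jobs : Int) (execution_times : List Int) (top_order : List Int) (num_machines : Int), Dom_schedule_jobs num_jobs execution_times top_order num_machines → Pre_schedule_jobs num_jobs execution_times top_order num_machines → Spec_schedule_jobs num_jobs execution_times top_order num_machines (schedule_jobs num_jobs execution_times top_order num_machines)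

-- ===== LEMMAS AND PROOFS =====

-- machine-times list ts viewed as the list of (time, machine_id) pairs, ids from off
def enumP (off : Int) : List Int → List (Int × Int)
  | [] => []
  | t :: ts => (t, off) :: enumP (off + 1) ts

theorem mem_enumP {off : Int} {ts : List Int} {p : Int × Int} (h : p ∈ enumP off ts) :
    off ≤ p.2 ∧ p.2 < off + ts.length ∧ p.1 = ts.getD (p.2 - off).toNat 0 := by
  induction ts generalizing off with
  | nil => simp [enumP] at h
  | cons t ts ih =>
    simp only [enumP, List.mem_cons] at h
    rcases h with h | h
    · subst h; simp
    · obtain ⟨h1, h2, h3⟩ := ih h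
      refine ⟨by omega, by simp; omega, ?_⟩
      have : (p.2 - off).toNat = (p.2 - (off + 1)).toNat + 1 := by omega
      rw [this]; simpa using h3

theorem getD_mem_enumP {off : Int} {ts : List Int} {i : Int} (h0 : off ≤ i)
    (h1 : i < off + ts.length) : (ts.getD (i - off).toNat 0, i) ∈ enumP off ts := by
  induction ts generalizing off with
  | nil => simp at h1; omega
  | cons t ts ih =>
    simp only [enumP, List.mem_cons]
    by_cases hio : i = off
    · left; subst hio; simp
    · right
      have : (i - off).toNat = (i - (off + 1)).toNat + 1 := by omega
      rw [this]
      simpa using ih (by omega) (by simp at h1 ⊢; omega)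

theorem length_enumP (off : Int) (ts : List Int) : (enumP off ts).length = ts.length := by
  induction ts generalizing off with
  | nil => rfl
  | cons t ts ih => simp [enumP, ih]

theorem enumP_set {off : Int} {ts : List Int} (k : Nat) (v : Int) (hk : k < ts.length) :
    (enumP off (ts.set k v)).Perm
      ((v, off + k) :: (enumP off ts).erase (ts.getD k 0, off + k)) := by
  induction ts generalizing off k with
  | nil => simp at hk
  | cons t ts ih =>
    cases k with
    | zero => simp [enumP, List.erase_cons_head]
    | succ k =>
      have hne : ((t, off) == (ts.getD k 0, off + ((k : Nat) + 1 : Nat))) = false := by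
        simp; omega
      simp only [List.set_cons_succ, enumP, List.getD_cons_succ, List.erase_cons, hne]
      have h1 := List.Perm.cons (t, off) (ih (off := off + 1) k (by simpa using hk))
      have h2 : (off + 1 + (k : Int)) = off + ((k : Nat) + 1 : Nat) := by push_cast; ring
      rw [h2] at h1
      exact h1.trans (List.Perm.swap _ _ _)

theorem enumP_replicate (d : Nat) (off : Int) :
    ((PySem.List.pyRange off (off + d) 1).map (fun i => ((0 : Int), i))) =
      enumP off (List.replicate d 0) := by
  induction d generalizing off with
  | zero => simp [PySem.List.pyRange_one_eq_nil, enumP]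
  | succ d ih =>
    rw [PySem.List.pyRange_one_cons (by omega)]
    have : off + ((d : Nat) + 1 : Nat) = (off + 1) + d := by push_cast; ring
    simp only [List.replicate_succ, enumP, List.map_cons, this, ih (off + 1)]

theorem lexLt_false_iff (a b : Int × Int) :
    lexLt a b = false ↔ b.1 ≤ a.1 ∧ (a.1 = b.1 → b.2 ≤ a.2) := by
  simp only [lexLt, Bool.or_eq_false_iff, Bool.and_eq_false_iff, decide_eq_false_iff_not,
    beq_eq_false_iff_ne, ne_eq]
  omega

theorem lexLt_false_trans {a b c : Int × Int} (h1 : lexLt a b = false)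
    (h2 : lexLt b c = false) : lexLt a c = false := by
  rw [lexLt_false_iff] at *; omega

theorem foldl_min_spec (xs : List (Int × Int)) : ∀ x : Int × Int,
    (xs.foldl (fun m y => if lexLt y m then y else m) x) ∈ x :: xs ∧
    ∀ y ∈ x :: xs, lexLt y (xs.foldl (fun m y => if lexLt y m then y else m) x) = false := by
  induction xs with
  | nil =>
    intro x
    refine ⟨by simp, ?_⟩
    intro y hy
    rw [List.mem_singleton] at hy; subst hy
    simp only [List.foldl_nil]
    rw [lexLt_false_iff]; omega
  | cons z zs ih =>
    intro x
    simp only [List.foldl_cons]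
    by_cases h : lexLt z x
    · simp only [h, if_pos]
      obtain ⟨hmem, hmin⟩ := ih z
      refine ⟨?_, ?_⟩
      · rcases List.mem_cons.mp hmem with h1 | h1 <;> simp [h1]
      · intro y hy
        rcases List.mem_cons.mp hy with h1 | h1
        · rw [h1]
          have hzm := hmin z (by simp)
          have hxz : lexLt x z = false := by
            rw [lexLt_false_iff]
            simp only [lexLt, Bool.or_eq_true, decide_eq_true_eq, Bool.and_eq_true,
              beq_iff_eq] at h
            omega
          exact lexLt_false_trans hxz hzm
        · exact hmin y h1
    · rw [Bool.not_eq_true] at h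
      simp only [h, Bool.false_eq_true, if_neg, not_false_iff]
      obtain ⟨hmem, hmin⟩ := ih x
      refine ⟨?_, ?_⟩
      · rcases List.mem_cons.mp hmem with h1 | h1 <;> simp [h1]
      · intro y hy
        rcases List.mem_cons.mp hy with h1 | h1
        · rw [h1]; exact hmin x (by simp)
        · rcases List.mem_cons.mp h1 with h2 | h2
          · subst h2; exact lexLt_false_trans h (hmin x (by simp))
          · exact hmin y (by simp [h2])

theorem findMin_spec {h : List (Int × Int)} {m : Int × Int} (hm : findMin h = some m) :
    m ∈ h ∧ ∀ y ∈ h, lexLt y m = false := by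
  match h with
  | [] => simp [findMin] at hm
  | x :: xs =>
    simp only [findMin, Option.some.injEq] at hm
    subst hm
    exact foldl_min_spec xs x

theorem bestIdx_inv (ts : List Int) (n : Int) (d : Nat) :
    ∀ k b : Int, k + d = n → 0 ≤ b → b < k →
    (∀ i : Int, 0 ≤ i → i < k →
      lexLt (ts.getD i.toNat 0, i) (ts.getD b.toNat 0, b) = false) →
    (0 ≤ bestIdx ts (PySem.List.pyRange k n 1) b ∧
      bestIdx ts (PySem.List.pyRange k n 1) b < n ∧
      ∀ i : Int, 0 ≤ i → i < n →
        lexLt (ts.getD i.toNat 0, i)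
          (ts.getD (bestIdx ts (PySem.List.pyRange k n 1) b).toNat 0,
            bestIdx ts (PySem.List.pyRange k n 1) b) = false) := by
  induction d with
  | zero =>
    intro k b hk hb0 hbk hmin
    rw [PySem.List.pyRange_one_eq_nil (by omega)]
    simp only [bestIdx]
    exact ⟨hb0, by omega, fun i h0 h1 => hmin i h0 (by omega)⟩
  | succ d ih =>
    intro k b hk hb0 hbk hmin
    rw [PySem.List.pyRange_one_cons (by omega)]
    simp only [bestIdx]
    by_cases hc : ts.getD k.toNat 0 < ts.getD b.toNat 0
    · rw [if_pos hc]
      refine ih (k + 1) k (by omega) (by omega) (by omega) ?_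
      intro i h0 h1
      rw [lexLt_false_iff]
      by_cases hik : i = k
      · subst hik; omega
      · have := (lexLt_false_iff _ _).mp (hmin i h0 (by omega))
        simp only at this ⊢
        omega
    · rw [if_neg hc]
      refine ih (k + 1) b (by omega) hb0 (by omega) ?_
      intro i h0 h1
      by_cases hik : i = k
      · subst hik; rw [lexLt_false_iff]; simp only; omega
      · exact hmin i h0 (by omega)

theorem bestIdx_spec (ts : List Int) (n : Int) (hpos : 1 ≤ n) :
    0 ≤ bestIdx ts (PySem.List.pyRange 1 n 1) 0 ∧
      bestIdx ts (PySem.List.pyRange 1 n 1) 0 < n ∧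
      ∀ i : Int, 0 ≤ i → i < n →
        lexLt (ts.getD i.toNat 0, i)
          (ts.getD (bestIdx ts (PySem.List.pyRange 1 n 1) 0).toNat 0,
            bestIdx ts (PySem.List.pyRange 1 n 1) 0) = false := by
  refine bestIdx_inv ts n (n - 1).toNat 1 0 (by omega) (by omega) (by omega) ?_
  intro i h0 h1
  have : i = 0 := by omega
  subst this
  rw [lexLt_false_iff]; simp

theorem pyGet?_inrange {xs : List Int} {i : Int} (h0 : -(xs.length : Int) ≤ i)
    (h1 : i < (xs.length : Int)) :
    PySem.List.pyGet? xs i = some (xs.getD (if i < 0 then i + xs.length else i).toNat 0) := by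
  simp only [PySem.List.pyGet?, PySem.List.pyIdx?]
  split_ifs with ha hb hc
  · omega
  · rw [Option.bind_some, List.getElem?_eq_getElem (by omega),
      List.getD_eq_getElem?_getD, List.getElem?_eq_getElem (by omega)]
    simp
  · have he : xs.length - (-i).toNat = (i + xs.length).toNat := by omega
    rw [Option.bind_some, he, List.getElem?_eq_getElem (by omega),
      List.getD_eq_getElem?_getD, List.getElem?_eq_getElem (by omega)]
    simp
  · omega

theorem pySet?_inrange {xs : List Int} {i : Int} (v : Int) (h0 : -(xs.length : Int) ≤ i)
    (h1 : i < (xs.length : Int)) :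
    PySem.List.pySet? xs i v = some (xs.set (if i < 0 then i + xs.length else i).toNat v) := by
  simp only [PySem.List.pySet?, PySem.List.pyIdx?]
  split_ifs with ha hb hc
  · omega
  · simp
  · have he : xs.length - (-i).toNat = (i + xs.length).toNat := by omega
    rw [he]; simp
  · omega

theorem loop_agree (et : List Int) (nj nm : Int) :
    ∀ (top : List Int) (heap : List (Int × Int)) (ts jct : List Int),
    heap.Perm (enumP 0 ts) →
    ts.length = nm.toNat →
    (jct.length : Int) = nj →
    (top = [] ∨ 1 ≤ nm) →
    (∀ j ∈ top, (-nj ≤ j ∧ j < nj) ∧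
      (-(et.length : Int) ≤ j ∧ j < (et.length : Int))) →
    ∃ h' t' j', aLoop et top heap jct = some (h', j') ∧
      bLoop et nm top ts jct = some (t', j') ∧ j'.length = jct.length := by
  intro top
  induction top with
  | nil =>
    intro heap ts jct _ _ _ _ _
    exact ⟨heap, ts, jct, rfl, rfl, rfl⟩
  | cons job rest ih =>
    intro heap ts jct hperm hlen hjlen hnm hjobs
    have hnm1 : 1 ≤ nm := by
      rcases hnm with h | h
      · simp at h
      · exact h
    have hts : (ts.length : Int) = nm := by omega
    obtain ⟨hb0, hbn, hbmin⟩ := bestIdx_spec ts nm hnm1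
    set b := bestIdx ts (PySem.List.pyRange 1 nm 1) 0 with hbdef
    have hhlen : heap.length = ts.length := by rw [hperm.length_eq, length_enumP]
    obtain ⟨m, hm⟩ : ∃ m, findMin heap = some m := by
      cases heap with
      | nil => exfalso; simp at hhlen; omega
      | cons x xs => exact ⟨_, rfl⟩
    obtain ⟨hmmem, hmmin⟩ := findMin_spec hm
    have hmenum : m ∈ enumP 0 ts := hperm.mem_iff.mp hmmem
    obtain ⟨hm20, hm2lt, hm1⟩ := mem_enumP hmenum
    rw [sub_zero] at hm1
    rw [zero_add] at hm2lt
    have hbp_mem : (ts.getD b.toNat 0, b) ∈ enumP 0 ts := by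
      have := getD_mem_enumP (off := 0) (ts := ts) (i := b) (by omega) (by omega)
      rwa [sub_zero] at this
    have hA : lexLt (ts.getD b.toNat 0, b) m = false :=
      hmmin _ (hperm.mem_iff.mpr hbp_mem)
    have hB : lexLt m (ts.getD b.toNat 0, b) = false := by
      have := hbmin m.2 hm20 (by omega)
      rwa [← hm1, Prod.mk.eta] at this
    have hmbp : m = (ts.getD b.toNat 0, b) := by
      rw [lexLt_false_iff] at hA hB
      simp only at hA hB
      have h1 : m.1 = ts.getD b.toNat 0 := by omega
      have h2 : m.2 = b := by omega
      rw [← h1, ← h2]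
    -- the shared reads/writes of the loop body
    obtain ⟨⟨hj1, hj2⟩, hj3, hj4⟩ := hjobs job (by simp)
    have hge : PySem.List.pyGet? et job =
        some (et.getD (if job < 0 then job + et.length else job).toNat 0) :=
      pyGet?_inrange hj3 hj4
    set e := et.getD (if job < 0 then job + et.length else job).toNat 0 with hedef
    have hsj : PySem.List.pySet? jct job (m.1 + e) =
        some (jct.set (if job < 0 then job + jct.length else job).toNat (m.1 + e)) :=
      pySet?_inrange _ (by omega) (by omega)
    set jct' := jct.set (if job < 0 then job + jct.length else job).toNat (m.1 + e) with hjdef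
    have hgt : PySem.List.pyGet? ts b = some (ts.getD b.toNat 0) := by
      have := pyGet?_inrange (xs := ts) (i := b) (by omega) (by omega)
      rwa [if_neg (by omega)] at this
    have hst : PySem.List.pySet? ts b (ts.getD b.toNat 0 + e) =
        some (ts.set b.toNat (ts.getD b.toNat 0 + e)) := by
      have := pySet?_inrange (xs := ts) (i := b) (ts.getD b.toNat 0 + e) (by omega) (by omega)
      rwa [if_neg (by omega)] at this
    -- one step of each loop
    have hstepA : aLoop et (job :: rest) heap jct =
        aLoop et rest ((m.1 + e, m.2) :: heap.erase m) jct' := by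
      simp only [aLoop, hm, hge, hsj]
    have hstepB : bLoop et nm (job :: rest) ts jct =
        bLoop et nm rest (ts.set b.toNat (ts.getD b.toNat 0 + e)) jct' := by
      simp only [bLoop, ← hbdef, hgt, hge]
      rw [show m.1 = ts.getD b.toNat 0 from by rw [hmbp]] at hsj
      simp only [hsj, hst]
    -- invariant for the new states
    have hperm' : ((m.1 + e, m.2) :: heap.erase m).Perm
        (enumP 0 (ts.set b.toNat (ts.getD b.toNat 0 + e))) := by
      have hset := enumP_set (off := 0) (ts := ts) b.toNat (ts.getD b.toNat 0 + e) (by omega)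
      have hcast : ((0 : Int) + (b.toNat : Int)) = b := by omega
      rw [hcast] at hset
      refine List.Perm.trans ?_ hset.symm
      have h1 : m.1 + e = ts.getD b.toNat 0 + e := by rw [hmbp]
      have h2 : m.2 = b := by rw [hmbp]
      rw [h1, h2, ← hmbp]
      exact List.Perm.cons _ (hperm.erase m)
    obtain ⟨h', t', j', ha, hb, hl⟩ := ih ((m.1 + e, m.2) :: heap.erase m)
      (ts.set b.toNat (ts.getD b.toNat 0 + e)) jct' hperm'
      (by rw [List.length_set]; exact hlen)
      (by rw [hjdef, List.length_set]; exact hjlen)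
      (Or.inr hnm1)
      (fun j hj => hjobs j (List.mem_cons_of_mem _ hj))
    exact ⟨h', t', j', by rw [hstepA, ha], by rw [hstepB, hb],
      by rw [hl, hjdef, List.length_set]⟩

theorem initHeap_eq (nm : Int) :
    ((PySem.List.pyRange 0 nm 1).map (fun i => ((0 : Int), i))) =
      enumP 0 (List.replicate nm.toNat 0) := by
  by_cases h : 0 ≤ nm
  · have := enumP_replicate nm.toNat 0
    rwa [show (0 : Int) + (nm.toNat : Int) = nm by omega] at this
  · rw [PySem.List.pyRange_one_eq_nil (by omega),
      show nm.toNat = 0 by omega]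
    rfl

-- ===== VERDICT (by name: the statement is the Claim_ definition above) =====
theorem schedule_jobs_spec : Claim_equal_schedule_jobs := by
  intro nj et top nm _ hpre
  obtain ⟨hnj, hnm, hjobs⟩ := hpre
  unfold Spec_schedule_jobs schedule_jobs schedule_jobs_alt
  obtain ⟨h', t', j', ha, hb, hl⟩ := loop_agree et nj nm top
    ((PySem.List.pyRange 0 nm 1).map (fun i => ((0 : Int), i)))
    (List.replicate nm.toNat 0) (List.replicate nj.toNat 0)
    (by rw [initHeap_eq])
    (by rw [List.length_replicate])
    (by rw [List.length_replicate]; omega)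
    hnm hjobs
  simp only [ha, hb]
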